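-- pv_equiv track=rewrite | github.com/vipul-maheshwari/saarthi-ner | postprocessing/time_utils.py | filter_dates
-- ===== SOURCE A (Python) =====
-- def filter_dates(dates_list):
--     valid_list = []
--     for dates in dates_list:
--         if dates[0] != 'No pattern found' and dates[0] != "Invalid date":
--             valid_list.append(dates)
--
--     m = -1
--     response = []
--
--     for dates in valid_list:
--         if dates[1] > m:
--             m = dates[1]
--             response = [dates[0]]
--         elif dates[1] == m:
--             m = dates[1]
--             response.append(dates[0])
--
--     if len(response) == 0:
--         return None
--     return min(response)
-- ===== SOURCE B (Python) =====
-- def filter_dates(dates_list):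
--     valid = [d for d in dates_list
--              if d[0] != 'No pattern found' and d[0] != 'Invalid date']
--     if not valid:
--         return None
--     m = max(k for _, k in valid)
--     return min(t for t, k in valid if k == m)
-- ===== Notes on version B (the rewrite author's own statement) =====
-- stated objective: simpler
-- what changed: Replaces A's fused accumulator loop (running max with reset-and-collect of the tie list) by three separate passes: filter the valid rows, compute the max key once, then min over the labels carrying that key.
-- intended difference: On inputs whose valid rows all have keys below -1, A's m=-1 sentinel never matches so A returns None; B returns the alphabetically-first label among the max-key rows, which is the intended value since the sentinel None is an artefact of A's initialisation. — e.g. on filter_dates([("a", -5)]): A returns none, B returns some "a"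
import Mathlib
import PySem

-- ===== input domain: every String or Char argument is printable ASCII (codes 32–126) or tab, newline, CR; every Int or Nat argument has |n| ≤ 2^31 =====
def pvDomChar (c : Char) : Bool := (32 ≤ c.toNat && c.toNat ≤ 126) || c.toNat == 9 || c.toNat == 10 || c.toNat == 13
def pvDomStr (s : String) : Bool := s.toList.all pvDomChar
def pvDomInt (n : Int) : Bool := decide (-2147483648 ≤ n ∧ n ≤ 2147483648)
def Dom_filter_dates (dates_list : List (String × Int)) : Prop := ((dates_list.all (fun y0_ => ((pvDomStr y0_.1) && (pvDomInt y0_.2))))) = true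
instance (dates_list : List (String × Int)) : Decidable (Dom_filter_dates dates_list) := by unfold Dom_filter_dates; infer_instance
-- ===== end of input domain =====

-- B replaces A's fused running-max/reset-and-collect accumulator loop with three
-- separate passes (filter valid, max of the keys, min over the max-key labels); objective: simpler.
-- Where all valid keys are below -1 the two differ by design (see D_ below).

-- ===== PORT A =====
def filter_dates (dates_list : List (String × Int)) : Option String :=
  let valid_list := dates_list.foldl (fun acc d =>
      if d.1 != "No pattern found" && d.1 != "Invalid date" then acc ++ [d] else acc) []
  let st := valid_list.foldl (fun (st : Int × List String) d =>
      if d.2 > st.1 then (d.2, [d.1])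
      else if d.2 = st.1 then (d.2, st.2 ++ [d.1])
      else st) (-1, [])
  if st.2.length = 0 then none
  else PySem.List.min? st.2 (fun x => x)

-- ===== PORT B =====
def filter_dates_alt (dates_list : List (String × Int)) : Option String :=
  let valid := dates_list.filter (fun d =>
      d.1 != "No pattern found" && d.1 != "Invalid date")
  if valid.isEmpty then none
  else
    let m := (PySem.List.max? (valid.map (fun d => d.2)) (fun k => k)).getD 0
    PySem.List.min? ((valid.filter (fun d => d.2 == m)).map (fun d => d.1)) (fun x => x)

-- ===== PRECONDITION & SPEC =====
-- On inputs whose valid rows all have keys below -1, A's m=-1 sentinel never matches so A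
-- returns None; B returns the alphabetically-first label among the max-key rows, which is the
-- intended value since the sentinel None is an artefact of A's initialisation.
def D_filter_dates (dates_list : List (String × Int)) : Prop :=
  (∃ d ∈ dates_list, d.1 ≠ "No pattern found" ∧ d.1 ≠ "Invalid date") ∧
  ∀ d ∈ dates_list, d.1 ≠ "No pattern found" → d.1 ≠ "Invalid date" → d.2 < -1
instance (dates_list : List (String × Int)) : Decidable (D_filter_dates dates_list) := by
  unfold D_filter_dates; infer_instance

def Spec_filter_dates (dates_list : List (String × Int)) (out : Option String) : Prop :=
  ¬ D_filter_dates dates_list → out = filter_dates_alt dates_list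
instance (dates_list : List (String × Int)) (out : Option String) : Decidable (Spec_filter_dates dates_list out) := by
  unfold Spec_filter_dates; infer_instance

def pvDiffWitness_filter_dates : (List (String × Int)) := [("a", -5)]
def pvDiffWitnessOut_filter_dates : (Option String) × (Option String) := (none, some "a")

-- ===== CLAIM (what is proved, stated in full; the proofs are below) =====
def Claim_unchanged_filter_dates : Prop := ∀ (dates_list : List (String × Int)), Dom_filter_dates dates_list → Spec_filter_dates dates_list (filter_dates dates_list)
def Claim_changed_filter_dates : Prop := Dom_filter_dates (pvDiffWitness_filter_dates) ∧ D_filter_dates (pvDiffWitness_filter_dates) ∧ filter_dates (pvDiffWitness_filter_dates) = pvDiffWitnessOut_filter_dates.1 ∧ filter_dates_alt (pvDiffWitness_filter_dates) = pvDiffWitnessOut_filter_dates.2 ∧ pvDiffWitnessOut_filter_dates.1 ≠ pvDiffWitnessOut_filter_dates.2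
def Claim_exact_filter_dates : Prop := ∀ (dates_list : List (String × Int)), Dom_filter_dates dates_list → D_filter_dates dates_list → filter_dates dates_list ≠ filter_dates_alt dates_list

-- ===== LEMMAS AND PROOFS =====

-- A's fused loop, characterised: the first component is the running max of the keys,
-- the second is r (kept iff the max never rose) followed by the labels whose key equals the max.
theorem loopA_spec (l : List (String × Int)) (m : Int) (r : List String) :
    l.foldl (fun (st : Int × List String) d =>
        if d.2 > st.1 then (d.2, [d.1])
        else if d.2 = st.1 then (d.2, st.2 ++ [d.1])
        else st) (m, r)
      = (l.foldl (fun a d => max a d.2) m,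
         (if l.foldl (fun a d => max a d.2) m = m then r else [])
            ++ (l.filter (fun d => d.2 == l.foldl (fun a d => max a d.2) m)).map (fun d => d.1)) := by
  induction l generalizing m r with
  | nil => simp
  | cons d t ih =>
    have hmax := PySem.List.le_foldl_max_int t (fun d => d.2)
    simp only [List.foldl_cons, List.filter_cons]
    by_cases h1 : d.2 > m
    · rw [if_pos h1, ih]
      have hM : max m d.2 = d.2 := by omega
      have hle : d.2 ≤ t.foldl (fun a d => max a d.2) d.2 := (hmax d.2).1
      simp only [hM]
      have hne : t.foldl (fun a d => max a d.2) d.2 ≠ m := by omega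
      rw [if_neg hne]
      by_cases h2 : t.foldl (fun a d => max a d.2) d.2 = d.2
      · simp [h2]
      · have : (d.2 == t.foldl (fun a d => max a d.2) d.2) = false := by
          simp; omega
        simp [this, h2]
    · rw [if_neg h1]
      by_cases h2 : d.2 = m
      · rw [if_pos h2, ih]
        simp only [h2, max_self]
        by_cases h3 : t.foldl (fun a d => max a d.2) m = m
        · simp [h3]
        · have h3' : ¬ m = t.foldl (fun a d => max a d.2) m := fun h => h3 h.symm
          simp [h3, h3']
      · rw [if_neg h2, ih]
        have hM : max m d.2 = m := by omega
        simp only [hM]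
        have hle : m ≤ t.foldl (fun a d => max a d.2) m := (hmax m).1
        have : (d.2 == t.foldl (fun a d => max a d.2) m) = false := by
          simp; omega
        simp [this]

-- pull an outer max inside the running max
theorem foldl_max_max (t : List (String × Int)) (a b : Int) :
    max a (t.foldl (fun acc d => max acc d.2) b)
      = t.foldl (fun acc d => max acc d.2) (max a b) := by
  induction t generalizing b with
  | nil => rfl
  | cons d t ih =>
    simp only [List.foldl_cons]
    rw [ih, max_assoc]

-- the running max of the keys is attained: it is the seed or the key of a list element
theorem foldl_max_attained (t : List (String × Int)) (a : Int) :
    t.foldl (fun acc d => max acc d.2) a = a ∨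
    ∃ x ∈ t, x.2 = t.foldl (fun acc d => max acc d.2) a := by
  have h := PySem.List.foldl_max_mem (t.map (fun d => d.2)) a
  rw [List.foldl_map] at h
  rcases h with h | h
  · exact Or.inl h
  · rcases List.mem_map.mp h with ⟨x, hx, hx2⟩
    exact Or.inr ⟨x, hx, hx2⟩

-- on inputs outside D_, the two ports agree
theorem filter_dates_eq (dates_list : List (String × Int))
    (hD : ¬ D_filter_dates dates_list) :
    filter_dates dates_list = filter_dates_alt dates_list := by
  simp only [filter_dates, filter_dates_alt]
  rw [PySem.List.foldl_append_if_eq_filter, List.nil_append, loopA_spec]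
  match hval : dates_list.filter (fun d => d.1 != "No pattern found" && d.1 != "Invalid date") with
  | [] => simp [hval]
  | d :: t =>
    -- outside D_ with valid nonempty: some valid key is ≥ -1
    have hge : ∃ x ∈ (d :: t), (-1 : Int) ≤ x.2 := by
      unfold D_filter_dates at hD
      push_neg at hD
      have hdmem : d ∈ dates_list.filter (fun d => d.1 != "No pattern found" && d.1 != "Invalid date") := by
        rw [hval]; simp
      rw [List.mem_filter] at hdmem
      have hd12 : d.1 ≠ "No pattern found" ∧ d.1 ≠ "Invalid date" := by
        have := hdmem.2; simp at this; exact this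
      rcases hD ⟨d, hdmem.1, hd12⟩ with ⟨x, hx, h1, h2, h3⟩
      have hxmem : x ∈ (d :: t) := by
        rw [← hval, List.mem_filter]
        exact ⟨hx, by simp [h1, h2]⟩
      exact ⟨x, hxmem, by omega⟩
    simp only [hval]
    set M := t.foldl (fun a d => max a d.2) d.2 with hMdef
    have hMge : (-1 : Int) ≤ M := by
      have h := PySem.List.le_foldl_max_int t (fun d => d.2) d.2
      rcases hge with ⟨x, hx, hx2⟩
      rcases List.mem_cons.mp hx with h1 | h1
      · subst h1; have := h.1; omega
      · have := h.2 x h1; omega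
    have hM' : (d :: t).foldl (fun a d => max a d.2) (-1)
        = M := by
      simp only [List.foldl_cons]
      have : max (-1 : Int) d.2 = max (-1) (max d.2 d.2) := by omega
      rw [show t.foldl (fun a d => max a d.2) (max (-1 : Int) d.2)
            = max (-1) M from by rw [foldl_max_max]]
      omega
    rw [hM']
    have hmB : (PySem.List.max? ((d :: t).map (fun d => d.2)) (fun k => k)).getD 0 = M := by
      rw [List.map_cons, PySem.List.max?_id_cons, Option.getD_some, List.foldl_map]
    rw [hmB]
    -- the filter for key == M is nonempty, since M is attained
    have hne : ((d :: t).filter (fun x => x.2 == M)).map (fun d => d.1) ≠ [] := by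
      rcases foldl_max_attained t d.2 with h | ⟨x, hx, hx2⟩
      · intro hc
        have : d ∈ (d :: t).filter (fun x => x.2 == M) := by
          simp [List.mem_filter, hMdef, h]
        simp [List.map_eq_nil_iff.mp hc] at this
      · intro hc
        have : x ∈ (d :: t).filter (fun x => x.2 == M) := by
          simp [List.mem_filter, hx, hx2, ← hMdef]
        simp [List.map_eq_nil_iff.mp hc] at this
    have hlen : ¬ (((d :: t).filter (fun x => x.2 == M)).map (fun d => d.1)).length = 0 := by
      simpa [List.length_eq_zero_iff] using hne
    rw [ite_self, List.nil_append, if_neg hlen]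
    simp

-- ===== VERDICT (by name: the statements are the Claim_ definitions above) =====
theorem filter_dates_spec : Claim_unchanged_filter_dates := by
  intro dl _ hD
  exact filter_dates_eq dl hD

theorem filter_dates_changed : Claim_changed_filter_dates := by
  unfold Claim_changed_filter_dates; decide

theorem filter_dates_tight : Claim_exact_filter_dates := by
  intro dl _ hD
  rcases hD with ⟨⟨d0, hd0, hd01, hd02⟩, hall0⟩
  have hne : dl.filter (fun d => d.1 != "No pattern found" && d.1 != "Invalid date") ≠ [] := by
    intro hc
    have : d0 ∈ dl.filter (fun d => d.1 != "No pattern found" && d.1 != "Invalid date") := by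
      rw [List.mem_filter]; exact ⟨hd0, by simp [hd01, hd02]⟩
    simp [hc] at this
  match hval : dl.filter (fun d => d.1 != "No pattern found" && d.1 != "Invalid date") with
  | [] => exact absurd hval hne
  | d :: t =>
    have hall : ∀ x ∈ (d :: t), x.2 < -1 := by
      intro x hx
      have hxm : x ∈ dl.filter (fun d => d.1 != "No pattern found" && d.1 != "Invalid date") := by
        rw [hval]; exact hx
      rw [List.mem_filter] at hxm
      have h12 : x.1 ≠ "No pattern found" ∧ x.1 ≠ "Invalid date" := by
        have := hxm.2; simp at this; exact this
      exact hall0 x hxm.1 h12.1 h12.2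
    simp only [filter_dates, filter_dates_alt]
    rw [PySem.List.foldl_append_if_eq_filter, List.nil_append, loopA_spec, hval]
    -- A: the running max from -1 stays -1 (all keys < -1), so the filter is empty and A = none
    have hM' : (d :: t).foldl (fun a d => max a d.2) (-1) = -1 := by
      simp only [List.foldl_cons]
      rw [show t.foldl (fun a d => max a d.2) (max (-1 : Int) d.2)
            = max (-1) (t.foldl (fun a d => max a d.2) (max d.2 d.2)) from by
          rw [foldl_max_max]; congr 1; omega]
      rcases foldl_max_attained t d.2 with h | ⟨x, hx, hx2⟩
      · rw [show max d.2 d.2 = d.2 from by omega, h]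
        have := hall d (by simp); omega
      · rw [show max d.2 d.2 = d.2 from by omega, ← hx2]
        have := hall x (by simp [hx]); omega
    rw [hM']
    have hfilt : (d :: t).filter (fun x => x.2 == (-1 : Int)) = [] := by
      rw [List.filter_eq_nil_iff]
      intro x hx
      have := hall x hx
      simp; omega
    rw [hfilt]
    -- B: valid is nonempty and its max key is attained, so B returns some value
    simp only [List.isEmpty_cons, Bool.false_eq_true, if_false, List.map_nil,
      List.append_nil, ite_self, List.length_nil, if_true]
    have hmB : (PySem.List.max? ((d :: t).map (fun d => d.2)) (fun k => k)).getD 0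
        = t.foldl (fun a d => max a d.2) d.2 := by
      rw [List.map_cons, PySem.List.max?_id_cons, Option.getD_some, List.foldl_map]
    rw [hmB]
    set M := t.foldl (fun a d => max a d.2) d.2 with hMdef
    have hne2 : ((d :: t).filter (fun x => x.2 == M)).map (fun d => d.1) ≠ [] := by
      rcases foldl_max_attained t d.2 with h | ⟨x, hx, hx2⟩
      · intro hc
        have : d ∈ (d :: t).filter (fun x => x.2 == M) := by
          simp [List.mem_filter, hMdef, h]
        simp [List.map_eq_nil_iff.mp hc] at this
      · intro hc
        have : x ∈ (d :: t).filter (fun x => x.2 == M) := by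
          simp [List.mem_filter, hx, hx2, ← hMdef]
        simp [List.map_eq_nil_iff.mp hc] at this
    match hl : ((d :: t).filter (fun x => x.2 == M)).map (fun d => d.1) with
    | [] => exact absurd hl hne2
    | y :: ys =>
      rw [hl, PySem.List.min?_id_cons]
      simp
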